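-- pv_equiv track=rewrite | github.com/zikram013/Titancod | pythonProject/Titancod/FechaLarga.py | Flecha
-- ===== SOURCE A (Python) =====
-- def Flecha(entrada):
--     maxLarga = -1
--     entrada = list(entrada)
--     i = 0
--
--     while i < len(entrada):
--         if entrada[i] =='<':
--             j = i+1
--             while j < len(entrada) and entrada[j] in '-':
--                 j+=1
--             maxLarga = max(maxLarga, j-i)
--
--         if entrada[i] =='<':
--             j = i+1
--             while j < len(entrada) and entrada[j] in '=':
--                 j+=1
--             maxLarga = max(maxLarga, j-i)
--
--         if entrada[i] == '-':
--             j = i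
--             while j < len(entrada) and entrada[j] == '-':
--                 j += 1
--             if j < len(entrada) and entrada[j] == '>':
--                 maxLarga = max(maxLarga, j - i + 1)
--
--         if entrada[i] == '=':
--             j = i
--             while j < len(entrada) and entrada[j] == '=':
--                 j += 1
--             if j < len(entrada) and entrada[j] == '>':
--                 maxLarga = max(maxLarga, j - i + 1)
--         i+=1
--
--     return maxLarga
-- ===== SOURCE B (Python) =====
-- def Flecha(entrada):
--     # One pass over runs: a run of '-' or '=' of length L scores L+1 if it is
--     # immediately preceded by '<' or immediately followed by '>'; a lone '<' scores 1.
--     best = -1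
--     prev = ' '
--     n = len(entrada)
--     i = 0
--     while i < n:
--         c = entrada[i]
--         if c == '-' or c == '=':
--             j = i
--             while j < n and entrada[j] == c:
--                 j += 1
--             if prev == '<' or (j < n and entrada[j] == '>'):
--                 best = max(best, j - i + 1)
--             prev = c
--             i = j
--         else:
--             if c == '<':
--                 best = max(best, 1)
--             prev = c
--             i += 1
--     return best
-- ===== Notes on version B (the rewrite author's own statement) =====
-- stated objective: faster
-- what changed: B makes one pass over maximal dash/equals runs, scoring a run once by its preceding less-than or following greater-than sign, instead of A rescanning the run from every index inside it, turning O(n^2) into O(n).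
import Mathlib
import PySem

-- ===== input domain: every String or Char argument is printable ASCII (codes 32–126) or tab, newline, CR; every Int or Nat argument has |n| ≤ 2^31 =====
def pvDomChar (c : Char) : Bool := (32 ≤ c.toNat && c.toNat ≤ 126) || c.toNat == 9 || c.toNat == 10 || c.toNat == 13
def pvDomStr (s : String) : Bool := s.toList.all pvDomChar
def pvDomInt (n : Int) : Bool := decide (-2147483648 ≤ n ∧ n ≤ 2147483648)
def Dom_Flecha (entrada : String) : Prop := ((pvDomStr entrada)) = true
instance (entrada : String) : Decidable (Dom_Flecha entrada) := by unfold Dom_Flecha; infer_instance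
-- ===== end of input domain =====

-- B replaces A's per-index rescans of dash/equals runs by a single pass over maximal runs (faster; measured).


-- ===== PORT A =====
-- shared helper: length of the prefix of l consisting of the character c
-- (transliterates the inner `while j < n and entrada[j] == c: j += 1` scans of both programs)
def pvRunLen (c : Char) : List Char → Nat
  | [] => 0
  | x :: xs => if x = c then pvRunLen c xs + 1 else 0

-- A's outer `while i < len(entrada)` loop: one step per index, A's four branches in order
def pvGoA (m : Int) : List Char → Int
  | [] => m
  | x :: rest =>
    let m1 := if x = '<' then max m ((pvRunLen '-' rest : Int) + 1) else m
    let m2 := if x = '<' then max m1 ((pvRunLen '=' rest : Int) + 1) else m1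
    let m3 := if x = '-' then
        (if rest[pvRunLen '-' rest]? = some '>' then max m2 ((pvRunLen '-' rest : Int) + 2) else m2)
      else m2
    let m4 := if x = '=' then
        (if rest[pvRunLen '=' rest]? = some '>' then max m3 ((pvRunLen '=' rest : Int) + 2) else m3)
      else m3
    pvGoA m4 rest

-- ===== PORT B =====
-- B's single `while i < n` loop over maximal runs: a dash/equals run scores len+1 if preceded by a
-- left angle or followed by a right angle, and B jumps past the whole run (i = j); a lone left angle
-- scores 1; prev starts as a space (Python B's initial prev, a char that is not a left angle)
def pvGoB (best : Int) (prev : Char) : List Char → Int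
  | [] => best
  | c :: rest =>
    if c = '-' ∨ c = '=' then
      let r := pvRunLen c rest
      let best' := if prev = '<' ∨ rest[r]? = some '>' then max best ((r : Int) + 2) else best
      pvGoB best' c (rest.drop r)
    else
      pvGoB (if c = '<' then max best 1 else best) c rest
termination_by l => l.length
decreasing_by
  · simp only [List.length_drop, List.length_cons]; omega
  · simp


def Flecha (entrada : String) : Int := pvGoA (-1) entrada.toList

def Flecha_alt (entrada : String) : Int := pvGoB (-1) ' ' entrada.toList

-- ===== PRECONDITION & SPEC =====
def Spec_Flecha (entrada : String) (out : Int) : Prop := out = Flecha_alt entrada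
instance (entrada : String) (out : Int) : Decidable (Spec_Flecha entrada out) := by unfold Spec_Flecha; infer_instance

-- ===== CLAIM (what is proved, stated in full; the proofs are below) =====
def Claim_equal_Flecha : Prop := ∀ (entrada : String), Dom_Flecha entrada → Spec_Flecha entrada (Flecha entrada)

-- ===== LEMMAS AND PROOFS =====
lemma stepDash (d : Char) (hd : d = '-' ∨ d = '=') (m : Int) (rest : List Char) :
    pvGoA m (d :: rest) =
      pvGoA (if rest[pvRunLen d rest]? = some '>' then max m ((pvRunLen d rest : Int) + 2) else m) rest := by
  rcases hd with h | h <;> subst h <;> simp [pvGoA]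

lemma stepOther (c : Char) (hc : ¬(c = '-' ∨ c = '=')) (hc2 : c ≠ '<') (m : Int) (rest : List Char) :
    pvGoA m (c :: rest) = pvGoA m rest := by
  have h1 : c ≠ '-' := fun h => hc (Or.inl h)
  have h2 : c ≠ '=' := fun h => hc (Or.inr h)
  simp [pvGoA, h1, h2, hc2]

lemma stepLt (m : Int) (rest : List Char) :
    pvGoA m ('<' :: rest) =
      pvGoA (max (max m ((pvRunLen '-' rest : Int) + 1)) ((pvRunLen '=' rest : Int) + 1)) rest := by
  simp [pvGoA]

lemma stepBDash (d : Char) (hd : d = '-' ∨ d = '=') (best : Int) (prev : Char) (rest : List Char) :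
    pvGoB best prev (d :: rest) =
      pvGoB (if prev = '<' ∨ rest[pvRunLen d rest]? = some '>' then max best ((pvRunLen d rest : Int) + 2) else best)
        d (rest.drop (pvRunLen d rest)) := by
  rw [pvGoB]; simp [hd]

lemma stepBOther (c : Char) (hc : ¬(c = '-' ∨ c = '=')) (best : Int) (prev : Char) (rest : List Char) :
    pvGoB best prev (c :: rest) = pvGoB (if c = '<' then max best 1 else best) c rest := by
  rw [pvGoB]; simp [hc]

lemma pvGoA_run (rest : List Char) (d : Char) (hd : d = '-' ∨ d = '=') (m : Int) :
    pvGoA m (d :: rest) =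
      pvGoA (if rest[pvRunLen d rest]? = some '>' then max m ((pvRunLen d rest : Int) + 2) else m)
        (rest.drop (pvRunLen d rest)) := by
  induction rest generalizing m with
  | nil => rw [stepDash d hd]; simp [pvRunLen]
  | cons x rest3 ih =>
    by_cases hx : d = x
    · subst hx
      rw [stepDash d hd]
      have hr : pvRunLen d (d :: rest3) = pvRunLen d rest3 + 1 := by simp [pvRunLen]
      rw [hr]
      simp only [List.getElem?_cons_succ, List.drop_succ_cons]
      rw [ih]
      split <;> (try congr 1) <;> push_cast <;> omega
    · have hr : pvRunLen d (x :: rest3) = 0 := by simp only [pvRunLen]; rw [if_neg (fun h => hx h.symm)]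
      rw [stepDash d hd, hr]
      simp

lemma pvMain : ∀ (n : Nat) (l : List Char), l.length ≤ n → ∀ (m : Int) (prev : Char),
    (prev = '<' → ∀ c rest, l = c :: rest → (c = '-' ∨ c = '=') → ((pvRunLen c rest : Int) + 2 ≤ m)) →
    pvGoA m l = pvGoB m prev l := by
  intro n
  induction n with
  | zero =>
    intro l hl m prev _
    have : l = [] := List.eq_nil_of_length_eq_zero (Nat.le_zero.mp hl)
    subst this; simp [pvGoA, pvGoB]
  | succ n ih =>
    intro l hl m prev hguard
    match l with
    | [] => simp [pvGoA, pvGoB]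
    | c :: rest =>
      by_cases hdash : c = '-' ∨ c = '='
      · rw [pvGoA_run rest c hdash m, stepBDash c hdash m prev rest]
        have hlen : (rest.drop (pvRunLen c rest)).length ≤ n := by
          simp only [List.length_drop]; simp at hl; omega
        have hcnl : c ≠ '<' := by rcases hdash with h | h <;> subst h <;> decide
        by_cases hp : prev = '<'
        · have hb : (pvRunLen c rest : Int) + 2 ≤ m := hguard hp c rest rfl hdash
          have e1 : (if rest[pvRunLen c rest]? = some '>' then max m ((pvRunLen c rest : Int) + 2) else m) = m := by
            split <;> omega
          have e2 : (if prev = '<' ∨ rest[pvRunLen c rest]? = some '>' then max m ((pvRunLen c rest : Int) + 2) else m) = m := by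
            split <;> omega
          rw [e1, e2]
          exact ih _ hlen m c (fun h => absurd h hcnl)
        · have e : (if prev = '<' ∨ rest[pvRunLen c rest]? = some '>' then max m ((pvRunLen c rest : Int) + 2) else m)
              = (if rest[pvRunLen c rest]? = some '>' then max m ((pvRunLen c rest : Int) + 2) else m) := by
            simp [hp]
          rw [e]
          exact ih _ hlen _ c (fun h => absurd h hcnl)
      · by_cases hc : c = '<'
        · subst hc
          rw [stepLt m rest, stepBOther '<' hdash m prev rest, if_pos rfl]
          match rest with
          | [] => simp [pvGoA, pvGoB, pvRunLen]
          | d :: rest2 =>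
            by_cases hd2 : d = '-' ∨ d = '='
            · rw [pvGoA_run rest2 d hd2, stepBDash d hd2 (max m 1) '<' rest2,
                if_pos (Or.inl rfl : '<' = '<' ∨ rest2[pvRunLen d rest2]? = some '>')]
              have hlen : (rest2.drop (pvRunLen d rest2)).length ≤ n := by
                simp only [List.length_drop]; simp at hl; omega
              have hdnl : d ≠ '<' := by rcases hd2 with h | h <;> subst h <;> decide
              rcases hd2 with h | h <;> subst h
              · rw [show pvRunLen '-' ('-' :: rest2) = pvRunLen '-' rest2 + 1 from by simp [pvRunLen],
                    show pvRunLen '=' ('-' :: rest2) = 0 from by simp [pvRunLen]]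
                push_cast
                have e3 : (if rest2[pvRunLen '-' rest2]? = some '>'
                    then max (max (max m ((pvRunLen '-' rest2 : Int) + 1 + 1)) 1) ((pvRunLen '-' rest2 : Int) + 2)
                    else max (max m ((pvRunLen '-' rest2 : Int) + 1 + 1)) 1)
                    = max (max m 1) ((pvRunLen '-' rest2 : Int) + 2) := by
                  split <;> omega
                rw [e3]
                exact ih _ hlen _ '-' (fun hh => absurd hh (by decide))
              · rw [show pvRunLen '=' ('=' :: rest2) = pvRunLen '=' rest2 + 1 from by simp [pvRunLen],
                    show pvRunLen '-' ('=' :: rest2) = 0 from by simp [pvRunLen]]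
                push_cast
                have e3 : (if rest2[pvRunLen '=' rest2]? = some '>'
                    then max (max (max m 1) ((pvRunLen '=' rest2 : Int) + 1 + 1)) ((pvRunLen '=' rest2 : Int) + 2)
                    else max (max m 1) ((pvRunLen '=' rest2 : Int) + 1 + 1))
                    = max (max m 1) ((pvRunLen '=' rest2 : Int) + 2) := by
                  split <;> omega
                rw [e3]
                exact ih _ hlen _ '=' (fun hh => absurd hh (by decide))
            · have h0 : pvRunLen '-' (d :: rest2) = 0 := by
                simp only [pvRunLen]; rw [if_neg (fun h => hd2 (Or.inl h))]
              have h1 : pvRunLen '=' (d :: rest2) = 0 := by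
                simp only [pvRunLen]; rw [if_neg (fun h => hd2 (Or.inr h))]
              rw [h0, h1]
              have e : max (max m (((0:Nat):Int)+1)) (((0:Nat):Int)+1) = max m 1 := by push_cast; omega
              rw [e]
              have hlen : (d :: rest2).length ≤ n := by simp at hl ⊢; omega
              exact ih _ hlen (max m 1) '<'
                (fun _ c' rest' heq hds => by
                  cases heq
                  exact absurd hds hd2)
        · rw [stepOther c hdash hc m rest, stepBOther c hdash m prev rest, if_neg hc]
          have hlen : rest.length ≤ n := by simp at hl; omega
          exact ih _ hlen m c (fun hh => absurd hh hc)

-- ===== VERDICT (by name: the statement is the Claim_ definition above) =====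
theorem Flecha_spec : Claim_equal_Flecha := by
  intro entrada _
  unfold Spec_Flecha Flecha Flecha_alt
  exact pvMain entrada.toList.length entrada.toList le_rfl (-1) ' ' (fun h => absurd h (by decide))
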